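-- pv_equiv track=rewrite | github.com/Adnan525/cognitive_ai_api | render_board_need_fix.py | render_move_text
-- ===== SOURCE A (Python) =====
-- def render_move_text(moves: str):
--     moves_list = moves.split()
--     side = "White" if len(moves_list) % 2 == 1 else "White"
--     prevs = "\n"
--     for i, move in enumerate(moves_list[:-1]):
--         prevs += f"{move} "
--         if (i + 1) % 2 == 0:
--             prevs += "\n"
--     return f"Current move : {side, moves_list[-1]} \nPrevious moves : {prevs}"
-- ===== SOURCE B (Python) =====
-- def render_move_text(moves: str):
--     moves_list = moves.split()
--     side = "White"
--     prefix = moves_list[:-1]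
--     pieces = []
--     for j in range(0, len(prefix), 2):
--         chunk = prefix[j:j + 2]
--         pieces.append("".join(m + " " for m in chunk) + ("\n" if len(chunk) == 2 else ""))
--     prevs = "\n" + "".join(pieces)
--     return f"Current move : {side, moves_list[-1]} \nPrevious moves : {prevs}"
-- ===== Notes on version B (the rewrite author's own statement) =====
-- stated objective: alternative
-- what changed: B builds the previous-moves text by slicing the prefix into two-move chunks (range step 2 + join), instead of A's single enumerate pass that tracks index parity in a string accumulator.
import Mathlib
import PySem

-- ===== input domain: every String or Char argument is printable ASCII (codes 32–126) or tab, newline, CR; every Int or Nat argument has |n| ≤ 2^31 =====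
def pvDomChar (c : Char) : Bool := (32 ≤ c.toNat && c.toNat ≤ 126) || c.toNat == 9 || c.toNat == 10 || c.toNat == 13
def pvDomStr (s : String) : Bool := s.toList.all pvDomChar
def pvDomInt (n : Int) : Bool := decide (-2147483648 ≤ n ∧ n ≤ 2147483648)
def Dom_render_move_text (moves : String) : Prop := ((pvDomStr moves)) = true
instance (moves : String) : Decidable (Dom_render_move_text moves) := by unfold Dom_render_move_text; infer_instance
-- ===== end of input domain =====

-- B formats the previous-moves text from two-move chunks (range step 2 + join) instead of A's
-- single enumerate pass with an index-parity test; objective: alternative decomposition.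


-- ===== PORT A =====
-- shared helper: Python's repr of a str (as produced by the f-string's tuple formatting);
-- exact for strings of printable non-whitespace ASCII (the words split() yields on Dom)
def pyReprChars (s : List Char) : List Char :=
  let q : Char := if s.contains '\'' && !(s.contains '"') then '"' else '\''
  q :: (s.flatMap (fun c =>
    if c = '\\' then ['\\', '\\'] else if c = q then ['\\', q] else [c])) ++ [q]

-- f"Current move : {side, last} \nPrevious moves : {prevs}" (both Pythons share this line)
def renderTail (side : String) (last : String) (prevs : List Char) : String :=
  String.mk ("Current move : (".toList ++ pyReprChars side.toList ++ [',', ' ']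
    ++ pyReprChars last.toList ++ [')', ' ', '\n'] ++ "Previous moves : ".toList ++ prevs)

def render_move_text (moves : String) : String :=
  let moves_list := PySem.Str.split₀ moves
  let side := if PySem.Int.mod (moves_list.length : Int) 2 == 1 then "White" else "White"
  let prevs := (PySem.List.enumerate (PySem.List.slice moves_list none (some (-1))) 0).foldl
    (fun acc p =>
      let acc2 := acc ++ p.2.toList ++ [' ']
      if PySem.Int.mod (p.1 + 1) 2 == 0 then acc2 ++ ['\n'] else acc2) ['\n']
  renderTail side ((PySem.List.pyGet? moves_list (-1)).getD "") prevs

-- ===== PORT B =====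
def render_move_text_alt (moves : String) : String :=
  let moves_list := PySem.Str.split₀ moves
  let side := "White"
  let pref := PySem.List.slice moves_list none (some (-1))
  let pieces := (PySem.List.pyRange 0 (pref.length : Int) 2).map (fun j =>
    let chunk := PySem.List.slice pref (some j) (some (j + 2))
    (chunk.flatMap (fun m => m.toList ++ [' '])) ++ (if chunk.length == 2 then ['\n'] else []))
  renderTail side ((PySem.List.pyGet? moves_list (-1)).getD "") ('\n' :: pieces.flatten)

-- ===== PRECONDITION & SPEC =====
-- A (and B alike) raise IndexError on moves_list[-1] when moves has no words; excluded.
def Pre_render_move_text (moves : String) : Prop := PySem.Str.split₀ moves ≠ []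
instance (moves : String) : Decidable (Pre_render_move_text moves) := by unfold Pre_render_move_text; infer_instance
def pvWitness_render_move_text : String := "e4 e5 Nf3"
def Spec_render_move_text (moves : String) (out : String) : Prop := out = render_move_text_alt moves
instance (moves : String) (out : String) : Decidable (Spec_render_move_text moves out) := by unfold Spec_render_move_text; infer_instance

-- ===== CLAIM (what is proved, stated in full; the proofs are below) =====
def Claim_equal_render_move_text : Prop := ∀ (moves : String), Dom_render_move_text moves → Pre_render_move_text moves → Spec_render_move_text moves (render_move_text moves)

-- ===== LEMMAS AND PROOFS =====
-- common normal form of the previous-moves text, two moves at a time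
def chunkSpec : List String → List Char
  | [] => []
  | [a] => a.toList ++ [' ']
  | a :: b :: t => a.toList ++ [' '] ++ (b.toList ++ [' ']) ++ ['\n'] ++ chunkSpec t

theorem loopA (l : List String) : ∀ (s : Int), 0 ≤ s → PySem.Int.mod s 2 = 0 → ∀ (acc : List Char),
    (PySem.List.enumerate l s).foldl
      (fun acc p =>
        let acc2 := acc ++ p.2.toList ++ [' ']
        if PySem.Int.mod (p.1 + 1) 2 == 0 then acc2 ++ ['\n'] else acc2) acc
      = acc ++ chunkSpec l := by
  induction l using chunkSpec.induct with
  | case1 => intro s _ _ acc; simp [PySem.List.enumerate, chunkSpec]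
  | case2 a =>
    intro s hs h2 acc
    rw [PySem.Int.mod_eq_emod_of_pos (by omega)] at h2
    simp [PySem.List.enumerate, chunkSpec]
    omega
  | case3 a b t ih =>
    intro s hs h2 acc
    rw [PySem.Int.mod_eq_emod_of_pos (by omega)] at h2
    have d1 : ¬ ((2:Int) ∣ s + 1) := by omega
    have d2 : (2:Int) ∣ s + 1 + 1 := by omega
    have e2' : PySem.Int.mod (s + 1 + 1) 2 = 0 := by
      rw [PySem.Int.mod_eq_emod_of_pos (by omega)]; omega
    simp only [PySem.List.enumerate_cons, List.foldl_cons]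
    rw [ih (s + 1 + 1) (by omega) e2']
    simp [d1, d2, chunkSpec]

theorem pyRange_two (b : Int) :
    PySem.List.pyRange 0 b 2 = (List.range ((b + 1) / 2).toNat).map (fun k : Nat => 2 * (k : Int)) := by
  simp only [PySem.List.pyRange]
  rw [if_neg (by norm_num : ¬ ((2:Int) = 0)), if_pos (by norm_num : (0:Int) < 2)]
  by_cases hb : (0:Int) < b
  · rw [if_pos hb]
    have hc : (b - 0 + 2 - 1) = b + 1 := by ring
    rw [hc]
    exact List.map_congr_left (fun k _ => by ring)
  · rw [if_neg hb]
    have hc : ((b + 1) / 2).toNat = 0 := by omega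
    simp [hc]

theorem loopB (l : List String) :
    (((PySem.List.pyRange 0 (l.length : Int) 2).map (fun j =>
      let chunk := PySem.List.slice l (some j) (some (j + 2))
      (chunk.flatMap (fun m => m.toList ++ [' '])) ++ (if chunk.length == 2 then ['\n'] else []))).flatten)
      = chunkSpec l := by
  rw [pyRange_two, List.map_map]
  induction l using chunkSpec.induct with
  | case1 => simp [chunkSpec]
  | case2 a =>
    have hc : (((([a] : List String).length : Int) + 1) / 2).toNat = 1 := by simp
    rw [hc]
    simp only [List.range_one, List.map_cons, List.map_nil, Function.comp]
    norm_num
    simp [PySem.List.slice, chunkSpec]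
  | case3 a b t ih =>
    have hc : ((((a :: b :: t).length : Int) + 1) / 2).toNat = (((t.length : Int) + 1) / 2).toNat + 1 := by
      simp; omega
    rw [hc, List.range_succ_eq_map, List.map_cons, List.flatten_cons, List.map_map]
    have hs : ∀ (xs : List String) (k : Nat),
        PySem.List.slice xs (some (2 * (k : Int))) (some (2 * (k : Int) + 2)) = (xs.drop (2 * k)).take 2 := by
      intro xs k
      have h3 : (2 * (k : Int)) = ((2 * k : Nat) : Int) := by push_cast; ring
      have h4 : (2 * (k : Int)) + 2 = ((2 * k + 2 : Nat) : Int) := by push_cast; ring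
      rw [h4, h3, PySem.List.slice_natCast]
      congr 1
      omega
    have hshift : ∀ (k : Nat),
        (((fun j =>
          let chunk := PySem.List.slice (a :: b :: t) (some j) (some (j + 2))
          (chunk.flatMap (fun m => m.toList ++ [' '])) ++ (if chunk.length == 2 then ['\n'] else []))
          ∘ (fun k : Nat => 2 * (k : Int))) ∘ Nat.succ) k
        = ((fun j =>
          let chunk := PySem.List.slice t (some j) (some (j + 2))
          (chunk.flatMap (fun m => m.toList ++ [' '])) ++ (if chunk.length == 2 then ['\n'] else []))
          ∘ (fun k : Nat => 2 * (k : Int))) k := by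
      intro k
      simp only [Function.comp, Nat.succ_eq_add_one, hs]
      have hd : (a :: b :: t).drop (2 * (k + 1)) = t.drop (2 * k) := by
        have e : 2 * (k + 1) = 2 * k + 1 + 1 := by omega
        rw [e]
        simp
      rw [hd]
    rw [List.map_congr_left (fun k _ => hshift k)]
    have h0 : ((fun j =>
          let chunk := PySem.List.slice (a :: b :: t) (some j) (some (j + 2))
          (chunk.flatMap (fun m => m.toList ++ [' '])) ++ (if chunk.length == 2 then ['\n'] else []))
          ∘ (fun k : Nat => 2 * (k : Int))) 0
        = a.toList ++ [' '] ++ (b.toList ++ [' ']) ++ ['\n'] := by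
      simp [PySem.List.slice]
    rw [h0, ih]
    simp [chunkSpec]

theorem render_move_text_spec : Claim_equal_render_move_text := by
  intro moves _ _
  unfold Spec_render_move_text render_move_text render_move_text_alt
  simp only [ite_self]
  rw [loopA _ 0 (by omega) (by decide), loopB]
  rfl
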